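-- pv_equiv track=rewrite | github.com/ghjcfrt/BestdoriDownload | scr/download_bestdori_scores.py | slugify_song_title
-- ===== SOURCE A (Python) =====
-- import unicodedata
--
-- def slugify_song_title(title: str) -> str:
--     """将英文歌名转换为 assets 文件名用的 song_name：小写+下划线，仅保留字母数字。"""
--     t = title.strip()
--     # 统一unicode（移除音标等）
--     t = unicodedata.normalize("NFKD", t)
--     t = "".join(ch for ch in t if not unicodedata.combining(ch))
--     t = t.lower()
--
--     # 处理缩写：不要把 don't 变成 don_t（assets 常用 dont）
--     for ap in ("'", "’", "‘", "`", "´"):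
--         t = t.replace(ap, "")
--
--     # 常见符号统一
--     t = t.replace("&", " and ")
--
--     out = []
--     prev_us = False
--     for ch in t:
--         if ch.isalnum():
--             out.append(ch)
--             prev_us = False
--         else:
--             if not prev_us:
--                 out.append("_")
--                 prev_us = True
--     slug = "".join(out).strip("_")
--     while "__" in slug:
--         slug = slug.replace("__", "_")
--     return slug
-- ===== SOURCE B (Python) =====
-- import unicodedata
--
-- def slugify_song_title(title: str) -> str:
--     t = title.strip()
--     t = unicodedata.normalize("NFKD", t)
--     t = "".join(ch for ch in t if not unicodedata.combining(ch))
--     t = t.lower()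
--     for ap in ("'", "\u2019", "\u2018", "`", "\u00b4"):
--         t = t.replace(ap, "")
--     t = t.replace("&", " and ")
--     # map every non-alphanumeric character to a space, then let str.split
--     # collapse the runs and drop the edges; join the words with underscores
--     spaced = "".join(ch if ch.isalnum() else " " for ch in t)
--     return "_".join(spaced.split())
-- ===== Notes on version B (the rewrite author's own statement) =====
-- stated objective: simpler
-- what changed: A's stateful prev_us loop that emits collapsed underscores, plus its strip and repeated double-underscore-replace fix-up passes, are replaced by mapping every non-alphanumeric character to a space and letting str.split() with an underscore join produce the result; the run-collapsing state machine and both post-passes disappear.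
import Mathlib
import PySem

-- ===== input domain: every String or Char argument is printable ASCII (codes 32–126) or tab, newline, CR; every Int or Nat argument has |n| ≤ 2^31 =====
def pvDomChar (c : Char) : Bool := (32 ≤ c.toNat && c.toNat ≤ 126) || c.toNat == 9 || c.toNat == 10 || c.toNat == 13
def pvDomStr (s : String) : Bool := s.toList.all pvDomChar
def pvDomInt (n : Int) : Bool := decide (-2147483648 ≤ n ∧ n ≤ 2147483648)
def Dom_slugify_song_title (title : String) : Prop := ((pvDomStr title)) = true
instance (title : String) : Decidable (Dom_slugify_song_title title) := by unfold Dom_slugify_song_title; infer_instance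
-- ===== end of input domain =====

-- B replaces A's stateful prev_us run-collapsing loop and its strip/replace fix-ups by a
-- map-to-space + str.split + "_".join decomposition (objective: simpler); same return value.

-- Normalization prelude shared VERBATIM by both Python sources (strip, NFKD, combining
-- removal, lower, apostrophe removal, '&' -> ' and '); NFKD normalization and the
-- combining-mark filter are the identity on the ASCII input domain (exact on Dom).
def pvNormalize (title : String) : List Char :=
  let t := PySem.Chars.strip title.toList
  let t := PySem.Chars.lower t
  let t := PySem.Chars.replace t ['\''] []
  let t := PySem.Chars.replace t ['’'] []
  let t := PySem.Chars.replace t ['‘'] []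
  let t := PySem.Chars.replace t ['`'] []
  let t := PySem.Chars.replace t ['´'] []
  PySem.Chars.replace t ['&'] " and ".toList

-- ===== PORT A =====
-- the 'while "__" in slug: slug = slug.replace("__", "_")' loop; each effective iteration
-- strictly shortens slug, so fuel = slug.length is enough to reach the exit condition
def pvCollapse : Nat → List Char → List Char
  | 0, s => s
  | fuel+1, s =>
      if PySem.Chars.isIn ['_', '_'] s then pvCollapse fuel (PySem.Chars.replace s ['_', '_'] ['_'])
      else s

def slugify_song_title (title : String) : String :=
  let t := pvNormalize title
  let res := t.foldl (fun (st : List Char × Bool) ch =>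
      if PySem.Chars.isalnum ch then (st.1 ++ [ch], false)
      else if st.2 = false then (st.1 ++ ['_'], true) else st) ([], false)
  let slug := PySem.Chars.stripChars res.1 ['_']
  String.ofList (pvCollapse slug.length slug)

-- ===== PORT B =====
def slugify_song_title_alt (title : String) : String :=
  let t := pvNormalize title
  let spaced := t.map (fun ch => if PySem.Chars.isalnum ch then ch else ' ')
  String.ofList (PySem.Chars.join ['_'] (PySem.Chars.split₀ spaced))

-- ===== PRECONDITION & SPEC =====
def Spec_slugify_song_title (title : String) (out : String) : Prop := out = slugify_song_title_alt title
instance (title : String) (out : String) : Decidable (Spec_slugify_song_title title out) := by unfold Spec_slugify_song_title; infer_instance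

-- ===== CLAIM (what is proved, stated in full; the proofs are below) =====
def Claim_equal_slugify_song_title : Prop := ∀ (title : String), Dom_slugify_song_title title → Spec_slugify_song_title title (slugify_song_title title)

-- ===== LEMMAS AND PROOFS =====

-- the words of cs: maximal runs of alphanumeric characters
def pvWords : List Char → List (List Char)
  | [] => []
  | c :: cs =>
      if PySem.Chars.isalnum c then
        (c :: cs.takeWhile PySem.Chars.isalnum) :: pvWords (cs.dropWhile PySem.Chars.isalnum)
      else pvWords cs
termination_by cs => cs.length
decreasing_by
  · exact Nat.lt_succ_of_le (cs.length_dropWhile_le _)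
  · exact Nat.lt_succ_self _

-- what A's character loop appends starting from state prev
def pvMrest : List Char → Bool → List Char
  | [], _ => []
  | c :: cs, prev =>
      if PySem.Chars.isalnum c then c :: pvMrest cs false
      else if prev then pvMrest cs true else '_' :: pvMrest cs true

theorem alnum_not_space (c : Char) (h : PySem.Chars.isalnum c = true) :
    PySem.Chars.isspace c = false := by
  simp [PySem.Chars.isalnum, PySem.Chars.isalpha, PySem.Chars.isupper, PySem.Chars.islower,
    PySem.Chars.isdigit, Char.le_def, UInt32.le_iff_toNat_le] at h
  simp only [Char.toNat] at h
  simp only [PySem.Chars.isspace]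
  simp only [Bool.or_eq_false_iff, Bool.and_eq_false_iff, decide_eq_false_iff_not, Char.toNat]
  omega

theorem alnum_ne_us (c : Char) (h : PySem.Chars.isalnum c = true) : c ≠ '_' := by
  simp [PySem.Chars.isalnum, PySem.Chars.isalpha, PySem.Chars.isupper, PySem.Chars.islower,
    PySem.Chars.isdigit, Char.le_def] at h
  intro hc; subst hc; simp at h

theorem foldl_eq_mrest (cs : List Char) : ∀ out prev,
    (cs.foldl (fun (st : List Char × Bool) ch =>
      if PySem.Chars.isalnum ch then (st.1 ++ [ch], false)
      else if st.2 = false then (st.1 ++ ['_'], true) else st) (out, prev)).1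
    = out ++ pvMrest cs prev := by
  induction cs with
  | nil => intro out prev; simp [pvMrest]
  | cons c cs ih =>
    intro out prev
    by_cases h : PySem.Chars.isalnum c
    · simp [List.foldl_cons, h, ih, pvMrest]
    · cases prev <;> simp [List.foldl_cons, h, ih, pvMrest]

theorem split₀_go_words (cs : List Char) : ∀ cur acc,
    PySem.Chars.split₀.go (cs.map (fun ch => if PySem.Chars.isalnum ch then ch else ' ')) cur acc
    = acc.reverse ++ (if cur = [] then pvWords cs
        else (cur.reverse ++ cs.takeWhile PySem.Chars.isalnum) :: pvWords (cs.dropWhile PySem.Chars.isalnum)) := by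
  induction cs with
  | nil =>
    intro cur acc
    by_cases h : cur = [] <;> simp [PySem.Chars.split₀.go, h, pvWords]
  | cons c cs ih =>
    intro cur acc
    by_cases h : PySem.Chars.isalnum c
    · have hs := alnum_not_space c h
      by_cases hc : cur = [] <;>
        simp [PySem.Chars.split₀.go, h, hs, hc, ih, pvWords]
    · have hs : PySem.Chars.isspace ' ' = true := by decide
      by_cases hc : cur = [] <;>
        simp [PySem.Chars.split₀.go, h, hs, hc, ih, pvWords]

def pvTl (cs : List Char) : Bool := (cs.getLast?.map (fun c => !PySem.Chars.isalnum c)).getD false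

theorem pvTl_append (l₁ l₂ : List Char) (h : l₂ ≠ []) : pvTl (l₁ ++ l₂) = pvTl l₂ := by
  unfold pvTl
  rw [List.getLast?_append]
  cases hl : l₂.getLast? with
  | none => exact absurd (List.getLast?_eq_none_iff.mp hl) h
  | some x => simp

theorem pvTl_all_alnum (l : List Char) (h : ∀ a ∈ l, PySem.Chars.isalnum a = true) :
    pvTl l = false := by
  cases hl : l.getLast? with
  | none => simp [pvTl, hl]
  | some x =>
    have hx : x ∈ l := List.mem_of_getLast? hl
    simp [pvTl, hl, h x hx]

theorem pvTl_all_nonalnum (l : List Char) (hne : l ≠ [])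
    (h : ∀ a ∈ l, PySem.Chars.isalnum a = false) : pvTl l = true := by
  rw [pvTl, List.getLast?_eq_some_getLast hne]
  have hx : l.getLast hne ∈ l := List.getLast_mem hne
  simp [h _ hx]

theorem dropWhile_head_false {p : Char → Bool} : ∀ (cs : List Char) {d : Char} {r : List Char},
    cs.dropWhile p = d :: r → p d = false := by
  intro cs
  induction cs with
  | nil => intro d r h; simp at h
  | cons c cs ih =>
    intro d r h
    rw [List.dropWhile_cons] at h
    by_cases hc : p c = true
    · rw [if_pos hc] at h; exact ih h
    · rw [if_neg hc] at h
      cases h; simpa using hc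

theorem words_nil_all : ∀ (cs : List Char), pvWords cs = [] →
    ∀ a ∈ cs, PySem.Chars.isalnum a = false := by
  intro cs
  induction cs using pvWords.induct with
  | case1 => simp
  | case2 c cs h ih => intro hw; simp [pvWords, h] at hw
  | case3 c cs h ih =>
    intro hw a ha
    rw [pvWords, if_neg (by simp [h])] at hw
    rcases List.mem_cons.mp ha with rfl | ha
    · simpa using h
    · exact ih hw a ha

theorem mrest_run (cs : List Char) :
    pvMrest cs false =
      cs.takeWhile PySem.Chars.isalnum ++ pvMrest (cs.dropWhile PySem.Chars.isalnum) false := by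
  induction cs with
  | nil => simp [pvMrest]
  | cons c cs ih =>
    cases h : PySem.Chars.isalnum c with
    | true => simp [pvMrest, h, ih]
    | false => simp [pvMrest, h]

theorem mrest_true_aux : ∀ (n : Nat) (cs : List Char), cs.length ≤ n →
    pvMrest cs true
    = PySem.Chars.join ['_'] (pvWords cs)
      ++ (if pvWords cs ≠ [] ∧ pvTl cs = true then ['_'] else []) := by
  intro n
  induction n with
  | zero =>
    intro cs h
    have : cs = [] := List.length_eq_zero_iff.mp (Nat.le_zero.mp h)
    subst this
    simp [pvMrest, pvWords, PySem.Chars.join_nil]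
  | succ n ih =>
    intro cs hlen
    match cs with
    | [] => simp [pvMrest, pvWords, PySem.Chars.join_nil]
    | c :: cs =>
      have hcs : cs.length ≤ n := by simpa using Nat.le_of_succ_le_succ hlen
      cases h : PySem.Chars.isalnum c with
      | false =>
        have e1 : pvMrest (c :: cs) true = pvMrest cs true := by simp [pvMrest, h]
        have e2 : pvWords (c :: cs) = pvWords cs := by rw [pvWords, if_neg (by simp [h])]
        cases cs with
        | nil =>
          rw [e1, e2]
          simp [pvMrest, pvWords, PySem.Chars.join_nil]
        | cons d cs' =>
          have e3 : pvTl (c :: d :: cs') = pvTl (d :: cs') := by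
            simp [pvTl, List.getLast?_cons_cons]
          rw [e1, e2, e3, ih _ hcs]
      | true =>
        have hm : pvMrest (c :: cs) true
            = c :: (cs.takeWhile PySem.Chars.isalnum
                ++ pvMrest (cs.dropWhile PySem.Chars.isalnum) false) := by
          simp only [pvMrest, h, if_pos]
          rw [← mrest_run]
        have hw : pvWords (c :: cs)
            = (c :: cs.takeWhile PySem.Chars.isalnum)
              :: pvWords (cs.dropWhile PySem.Chars.isalnum) := by
          rw [pvWords, if_pos (by simp [h])]
        have hsplit := List.takeWhile_append_dropWhile
          (p := PySem.Chars.isalnum) (l := cs)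
        cases hrc : cs.dropWhile PySem.Chars.isalnum with
        | nil =>
          have hall : ∀ x ∈ cs, PySem.Chars.isalnum x = true :=
            List.dropWhile_eq_nil_iff.mp hrc
          have htl : pvTl (c :: cs) = false := by
            refine pvTl_all_alnum _ ?_
            intro a ha
            rcases List.mem_cons.mp ha with rfl | ha
            · exact h
            · exact hall a ha
          rw [hm, hw, hrc]
          simp [pvMrest, pvWords, PySem.Chars.join_singleton, htl]
        | cons d r' =>
          have hd : PySem.Chars.isalnum d = false := dropWhile_head_false cs hrc
          have hmr : pvMrest (d :: r') false = '_' :: pvMrest r' true := by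
            simp [pvMrest, hd]
          have hwr : pvWords (d :: r') = pvWords r' := by
            rw [pvWords, if_neg (by simp [hd])]
          have hr' : r'.length ≤ n := by
            have h1 : (cs.dropWhile PySem.Chars.isalnum).length ≤ cs.length :=
              List.length_dropWhile_le _ _
            rw [hrc] at h1
            simp at h1
            omega
          have hrec := ih r' hr'
          have hcseq : cs = cs.takeWhile PySem.Chars.isalnum ++ (d :: r') := by
            rw [← hrc, hsplit]
          by_cases hnil : pvWords r' = []
          · have hall' := words_nil_all r' hnil
            have htl : pvTl (c :: cs) = true := by
              rw [hcseq, show c :: (cs.takeWhile PySem.Chars.isalnum ++ (d :: r'))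
                  = (c :: cs.takeWhile PySem.Chars.isalnum) ++ (d :: r') by simp,
                pvTl_append _ _ (by simp)]
              refine pvTl_all_nonalnum _ (by simp) ?_
              intro a ha
              rcases List.mem_cons.mp ha with rfl | ha
              · exact hd
              · exact hall' a ha
            rw [hm, hw, hrc, hmr, hrec, hwr, hnil, htl]
            simp [PySem.Chars.join_singleton, PySem.Chars.join_nil]
          · have hr'ne : r' ≠ [] := by
              intro hcon; rw [hcon] at hnil; simp [pvWords] at hnil
            have htl : pvTl (c :: cs) = pvTl r' := by
              rw [hcseq, show c :: (cs.takeWhile PySem.Chars.isalnum ++ (d :: r'))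
                  = (c :: cs.takeWhile PySem.Chars.isalnum ++ [d]) ++ r' by simp,
                pvTl_append _ _ hr'ne]
            obtain ⟨w, ws, hws⟩ : ∃ w ws, pvWords r' = w :: ws := by
              cases hx : pvWords r' with
              | nil => exact absurd hx hnil
              | cons w ws => exact ⟨w, ws, rfl⟩
            rw [hm, hw, hrc, hmr, hrec, hwr, htl, hws, PySem.Chars.join_cons_cons]
            simp

theorem mrest_true (cs : List Char) :
    pvMrest cs true
    = PySem.Chars.join ['_'] (pvWords cs)
      ++ (if pvWords cs ≠ [] ∧ pvTl cs = true then ['_'] else []) :=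
  mrest_true_aux cs.length cs le_rfl

theorem mrest_false (cs : List Char) :
    PySem.Chars.stripChars (pvMrest cs false) ['_']
    = PySem.Chars.stripChars (pvMrest cs true) ['_'] := by
  cases cs with
  | nil => rfl
  | cons c cs =>
    cases h : PySem.Chars.isalnum c with
    | true => simp [pvMrest, h]
    | false =>
      simp only [pvMrest, h, Bool.false_eq_true, if_false, if_true]
      simp [PySem.Chars.stripChars]

theorem words_wf (cs : List Char) :
    ∀ w ∈ pvWords cs, w ≠ [] ∧ ∀ a ∈ w, PySem.Chars.isalnum a = true := by
  induction cs using pvWords.induct with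
  | case1 => simp [pvWords]
  | case2 c cs h ih =>
    intro w hw
    rw [pvWords, if_pos (by simp [h])] at hw
    rcases List.mem_cons.mp hw with rfl | hw
    · refine ⟨by simp, ?_⟩
      intro a ha
      rcases List.mem_cons.mp ha with rfl | ha
      · exact h
      · exact List.mem_takeWhile_imp ha
    · exact ih w hw
  | case3 c cs h ih =>
    intro w hw
    rw [pvWords, if_neg (by simpa using h)] at hw
    exact ih w hw

theorem split₀_go_words' (cs : List Char) :
    PySem.Chars.split₀ (cs.map (fun ch => if PySem.Chars.isalnum ch then ch else ' '))
    = pvWords cs := by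
  unfold PySem.Chars.split₀
  rw [split₀_go_words cs [] []]
  simp

theorem collapse_id (fuel : Nat) (s : List Char)
    (h : PySem.Chars.isIn ['_', '_'] s = false) : pvCollapse fuel s = s := by
  cases fuel with
  | zero => rfl
  | succ n => simp [pvCollapse, h]

theorem join_head_alnum : ∀ (ws : List (List Char)),
    (∀ w ∈ ws, w ≠ [] ∧ ∀ a ∈ w, PySem.Chars.isalnum a = true) → ws ≠ [] →
    ∃ b rest, PySem.Chars.join ['_'] ws = b :: rest ∧ PySem.Chars.isalnum b = true := by
  intro ws
  match ws with
  | [] => intro _ h; exact absurd rfl h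
  | w :: ws' =>
    intro h _
    obtain ⟨hne, hall⟩ := h w (by simp)
    obtain ⟨b, w', rfl⟩ : ∃ b w', w = b :: w' := by
      cases w with
      | nil => exact absurd rfl hne
      | cons b w' => exact ⟨b, w', rfl⟩
    have hb : PySem.Chars.isalnum b = true := hall b (by simp)
    cases ws' with
    | nil => exact ⟨b, w', by simp [PySem.Chars.join_singleton], hb⟩
    | cons v vs =>
      refine ⟨b, w' ++ ['_'] ++ PySem.Chars.join ['_'] (v :: vs), ?_, hb⟩
      rw [PySem.Chars.join_cons_cons]
      simp

theorem join_last_alnum : ∀ (ws : List (List Char)),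
    (∀ w ∈ ws, w ≠ [] ∧ ∀ a ∈ w, PySem.Chars.isalnum a = true) → ws ≠ [] →
    ∃ e, (PySem.Chars.join ['_'] ws).getLast? = some e ∧ PySem.Chars.isalnum e = true := by
  intro ws
  induction ws with
  | nil => intro _ h; exact absurd rfl h
  | cons w ws' ih =>
    intro h _
    obtain ⟨hne, hall⟩ := h w (by simp)
    cases ws' with
    | nil =>
      refine ⟨w.getLast hne, ?_, hall _ (List.getLast_mem hne)⟩
      rw [PySem.Chars.join_singleton, List.getLast?_eq_some_getLast hne]
    | cons v vs =>
      obtain ⟨e, he, halne⟩ := ih (fun u hu => h u (by simp [hu])) (by simp)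
      refine ⟨e, ?_, halne⟩
      rw [PySem.Chars.join_cons_cons, List.getLast?_append, List.getLast?_append]
      have : (PySem.Chars.join ['_'] (v :: vs)).getLast? = some e := he
      simp [this]

theorem chain_all (l : List Char) (h : ∀ a ∈ l, PySem.Chars.isalnum a = true) :
    List.IsChain (fun a b => a ≠ '_' ∨ b ≠ '_') l := by
  induction l with
  | nil => simp
  | cons a l ih =>
    rw [List.isChain_cons]
    refine ⟨?_, ih (fun x hx => h x (by simp [hx]))⟩
    intro y _
    exact Or.inl (alnum_ne_us a (h a (by simp)))

theorem chain_join : ∀ (ws : List (List Char)),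
    (∀ w ∈ ws, w ≠ [] ∧ ∀ a ∈ w, PySem.Chars.isalnum a = true) →
    List.IsChain (fun a b => a ≠ '_' ∨ b ≠ '_') (PySem.Chars.join ['_'] ws) := by
  intro ws
  induction ws with
  | nil => intro _; simp [PySem.Chars.join_nil]
  | cons w ws' ih =>
    intro h
    obtain ⟨hne, hall⟩ := h w (by simp)
    cases ws' with
    | nil => rw [PySem.Chars.join_singleton]; exact chain_all w hall
    | cons v vs =>
      have hrec := ih (fun u hu => h u (by simp [hu]))
      obtain ⟨b, rest, hj, hb⟩ :=
        join_head_alnum (v :: vs) (fun u hu => h u (by simp [hu])) (by simp)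
      rw [PySem.Chars.join_cons_cons]
      rw [List.isChain_append]
      refine ⟨?_, ?_, ?_⟩
      · rw [List.isChain_append]
        refine ⟨chain_all w hall, by simp, ?_⟩
        intro x hx y hy
        have hxw : x ∈ w := List.mem_of_getLast? hx
        exact Or.inl (alnum_ne_us x (hall x hxw))
      · exact hrec
      · intro x hx y hy
        rw [hj] at hy
        simp at hx hy
        subst hx; subst hy
        exact Or.inr (alnum_ne_us b hb)

theorem strip_join (ws : List (List Char))
    (h : ∀ w ∈ ws, w ≠ [] ∧ ∀ a ∈ w, PySem.Chars.isalnum a = true)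
    (t : List Char) (ht : t = [] ∨ t = ['_']) :
    PySem.Chars.stripChars (PySem.Chars.join ['_'] ws ++ t) ['_']
    = PySem.Chars.join ['_'] ws := by
  cases hws : ws with
  | nil =>
    rw [PySem.Chars.join_nil]
    rcases ht with rfl | rfl <;> simp <;> decide
  | cons w ws' =>
    rw [← hws]
    obtain ⟨b, rest, hj, hb⟩ := join_head_alnum ws h (by simp [hws])
    obtain ⟨e, he, halne⟩ := join_last_alnum ws h (by simp [hws])
    have hbus : b ≠ '_' := alnum_ne_us b hb
    have heus : e ≠ '_' := alnum_ne_us e halne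
    unfold PySem.Chars.stripChars
    dsimp only
    have h1 : List.dropWhile (fun c => List.contains ['_'] c)
        (PySem.Chars.join ['_'] ws ++ t) = PySem.Chars.join ['_'] ws ++ t := by
      rw [hj]
      simp only [List.cons_append, List.dropWhile_cons]
      rw [if_neg (by simp [hbus])]
    rw [h1, List.reverse_append]
    have h2 : List.dropWhile (fun c => List.contains ['_'] c)
        (t.reverse ++ (PySem.Chars.join ['_'] ws).reverse)
        = (PySem.Chars.join ['_'] ws).reverse := by
      obtain ⟨e', rev', hrev⟩ : ∃ e' rev',
          (PySem.Chars.join ['_'] ws).reverse = e' :: rev' := by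
        have : (PySem.Chars.join ['_'] ws).reverse.head? = some e := by
          rw [← List.getLast?_eq_head?_reverse]; exact he
        cases hx : (PySem.Chars.join ['_'] ws).reverse with
        | nil => rw [hx] at this; simp at this
        | cons a l => exact ⟨a, l, rfl⟩
      have he' : e' = e := by
        have : (PySem.Chars.join ['_'] ws).reverse.head? = some e := by
          rw [← List.getLast?_eq_head?_reverse]; exact he
        rw [hrev] at this; simpa using this
      subst he'
      rcases ht with rfl | rfl
      · simp only [List.reverse_nil, List.nil_append]
        rw [hrev, List.dropWhile_cons, if_neg (by simp [heus])]
      · simp only [List.reverse_cons, List.reverse_nil, List.nil_append, List.cons_append,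
          List.dropWhile_cons]
        rw [if_pos (by simp), hrev, List.dropWhile_cons, if_neg (by simp [heus])]
    rw [h2, List.reverse_reverse]

theorem no_dbl (ws : List (List Char))
    (h : ∀ w ∈ ws, w ≠ [] ∧ ∀ a ∈ w, PySem.Chars.isalnum a = true) :
    PySem.Chars.isIn ['_', '_'] (PySem.Chars.join ['_'] ws) = false := by
  rw [PySem.Chars.isIn_eq_false_iff]
  intro hinf
  obtain ⟨s1, t1, heq⟩ := hinf
  have hc := chain_join ws h
  rw [← heq, List.append_assoc, List.isChain_append] at hc
  have hc2 := (List.isChain_append.mp hc.2.1).1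
  rw [List.isChain_cons] at hc2
  have := hc2.1 '_' (by simp)
  simp at this

-- ===== VERDICT (by name: the statement is the Claim_ definition above) =====
theorem slugify_song_title_spec : Claim_equal_slugify_song_title := by
  intro title _
  unfold Spec_slugify_song_title slugify_song_title slugify_song_title_alt
  dsimp only
  rw [foldl_eq_mrest (pvNormalize title) [] false]
  rw [split₀_go_words' (pvNormalize title)]
  rw [List.nil_append, mrest_false, mrest_true]
  rw [strip_join _ (words_wf (pvNormalize title)) _ (by split_ifs <;> simp)]
  rw [collapse_id _ _ (no_dbl _ (words_wf (pvNormalize title)))]
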